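-- pv_equiv track=rewrite | github.com/idanwekhai/Advent_of_code_2021 | Day 4.py | make_matrices
-- ===== SOURCE A (Python) =====
-- def make_matrices(lst, size=5):
--   temp = []
--   matrix_collect = []
--   for i in lst:
--     h = map(int, i.strip(" ").split())
--     to_int = [i for i in h]
--     if len(temp) < size:
--       temp.append(to_int)
--     else:
--       matrix_collect.append(temp)
--       temp = []
--       temp.append(to_int)
--   matrix_collect.append(temp)
--   return matrix_collect
-- ===== SOURCE B (Python) =====
-- def make_matrices(lst, size=5):
--     rows = [[int(t) for t in s.strip(" ").split()] for s in lst]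
--     return [rows[i:i + size] for i in range(0, len(rows), size)]
-- ===== Notes on version B (the rewrite author's own statement) =====
-- stated objective: simpler
-- what changed: B materialises all integer rows in one comprehension and then chunks them by index-stepped slicing (range(0,len,size) + rows[i:i+size]), replacing A's single stateful loop that interleaves parsing with a flush-on-overflow accumulator.
-- intended difference: On the empty input list A returns [[]] (an artefact of its unconditional trailing flush of the empty accumulator) while B returns [], the intended 'no matrices' value. — e.g. on make_matrices([], 2): A returns [[]], B returns []
-- outside the precondition, e.g. on make_matrices(['1'], 0): A returns [[], [[1]]], B raises ValueError; on make_matrices(['1'], -1): A returns [[], [[1]]], B returns []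
import Mathlib
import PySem

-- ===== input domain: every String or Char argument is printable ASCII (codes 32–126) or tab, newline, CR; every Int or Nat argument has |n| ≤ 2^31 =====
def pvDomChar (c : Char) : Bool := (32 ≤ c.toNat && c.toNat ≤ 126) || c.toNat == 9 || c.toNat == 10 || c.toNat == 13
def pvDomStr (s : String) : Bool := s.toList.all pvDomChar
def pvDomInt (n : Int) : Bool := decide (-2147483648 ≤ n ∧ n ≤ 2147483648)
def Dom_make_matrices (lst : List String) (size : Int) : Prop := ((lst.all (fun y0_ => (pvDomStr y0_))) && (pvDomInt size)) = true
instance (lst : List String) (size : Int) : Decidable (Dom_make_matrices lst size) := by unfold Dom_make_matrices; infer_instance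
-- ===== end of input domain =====

-- B replaces A's flush-on-overflow accumulator loop by materialise-rows-then-chunk-by-slicing (simpler decomposition, same cost).

-- ===== PORT A =====
def make_matrices (lst : List String) (size : Int) : List (List (List Int)) :=
  let fin := lst.foldl
    (fun (st : List (List Int) × List (List (List Int))) (i : String) =>
      let to_int := (PySem.Str.split₀ (PySem.Str.stripChars i " ")).map
        (fun t => (PySem.Int.ofStr? t).getD 0)   -- int(t); Pre_ guarantees it parses
      if PySem.List.len st.1 < size then (st.1 ++ [to_int], st.2)
      else ([to_int], st.2 ++ [st.1]))
    ([], [])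
  fin.2 ++ [fin.1]

-- ===== PORT B =====
-- row parser: [int(t) for t in s.strip(" ").split()]
def pvRow (s : String) : List Int :=
  (PySem.Str.split₀ (PySem.Str.stripChars s " ")).map (fun t => (PySem.Int.ofStr? t).getD 0)

def make_matrices_alt (lst : List String) (size : Int) : List (List (List Int)) :=
  let rows := lst.map pvRow
  (PySem.List.pyRange 0 (PySem.List.len rows) size).map
    (fun i => PySem.List.slice rows (some i) (some (i + size)))

-- ===== PRECONDITION & SPEC =====
-- Pre_ restricts to the natural domain of chunking, size ≥ 1 (for size ≤ 0 Python A returns an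
-- accidental value and B raises ValueError or returns []), and excludes lines whose tokens are
-- not valid int literals, where both Pythons raise ValueError.
def Pre_make_matrices (lst : List String) (size : Int) : Prop :=
  (decide (1 ≤ size) && lst.all (fun s =>
    (PySem.Str.split₀ (PySem.Str.stripChars s " ")).all
      (fun t => (PySem.Int.ofStr? t).isSome))) = true
instance (lst : List String) (size : Int) : Decidable (Pre_make_matrices lst size) := by
  unfold Pre_make_matrices; infer_instance

def pvWitness_make_matrices : List String × Int := (["1 2", "3 4", "5"], 2)

-- On the empty input list A returns [[]] (an artefact of its unconditional trailing flush of the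
-- empty accumulator) while B returns [], the intended 'no matrices' value.
def D_make_matrices (lst : List String) (size : Int) : Prop := lst = []
instance (lst : List String) (size : Int) : Decidable (D_make_matrices lst size) := by
  unfold D_make_matrices; infer_instance

def Spec_make_matrices (lst : List String) (size : Int) (out : List (List (List Int))) : Prop :=
  ¬ D_make_matrices lst size → out = make_matrices_alt lst size
instance (lst : List String) (size : Int) (out : List (List (List Int))) : Decidable (Spec_make_matrices lst size out) := by unfold Spec_make_matrices; infer_instance

def pvDiffWitness_make_matrices : List String × Int := ([], 2)
def pvDiffWitnessOut_make_matrices : (List (List (List Int))) × (List (List (List Int))) := ([[]], [])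

-- ===== CLAIM (what is proved, stated in full; the proofs are below) =====
def Claim_unchanged_make_matrices : Prop := ∀ (lst : List String) (size : Int), Dom_make_matrices lst size → Pre_make_matrices lst size → Spec_make_matrices lst size (make_matrices lst size)
def Claim_changed_make_matrices : Prop := Dom_make_matrices (pvDiffWitness_make_matrices.1) (pvDiffWitness_make_matrices.2) ∧ Pre_make_matrices (pvDiffWitness_make_matrices.1) (pvDiffWitness_make_matrices.2) ∧ D_make_matrices (pvDiffWitness_make_matrices.1) (pvDiffWitness_make_matrices.2) ∧ make_matrices (pvDiffWitness_make_matrices.1) (pvDiffWitness_make_matrices.2) = pvDiffWitnessOut_make_matrices.1 ∧ make_matrices_alt (pvDiffWitness_make_matrices.1) (pvDiffWitness_make_matrices.2) = pvDiffWitnessOut_make_matrices.2 ∧ pvDiffWitnessOut_make_matrices.1 ≠ pvDiffWitnessOut_make_matrices.2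
def Claim_exact_make_matrices : Prop := ∀ (lst : List String) (size : Int), Dom_make_matrices lst size → Pre_make_matrices lst size → D_make_matrices lst size → make_matrices lst size ≠ make_matrices_alt lst size

-- ===== LEMMAS AND PROOFS =====

-- chunking in s-sized groups (the common shape both programs compute, for 1 ≤ s)
def pvChunks {α : Type} (s : Nat) : List α → List (List α)
  | [] => []
  | x :: xs => (x :: xs.take (s - 1)) :: pvChunks s (xs.drop (s - 1))
termination_by l => l.length
decreasing_by simp; try omega

theorem pvChunks_nil {α : Type} (s : Nat) : pvChunks s ([] : List α) = [] := by rw [pvChunks]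

theorem pvChunks_cons {α : Type} (s : Nat) (hs : 0 < s) (x : α) (xs : List α) :
    pvChunks s (x :: xs) = (x :: xs).take s :: pvChunks s ((x :: xs).drop s) := by
  obtain ⟨s', rfl⟩ : ∃ s', s = s' + 1 := ⟨s - 1, by omega⟩
  rw [pvChunks]; simp

theorem pvChunks_small {α : Type} (s : Nat) (hs : 0 < s) (rows : List α)
    (hne : rows ≠ []) (hle : rows.length ≤ s) : pvChunks s rows = [rows] := by
  cases rows with
  | nil => exact absurd rfl hne
  | cons x xs =>
    rw [pvChunks_cons s hs]
    have h1 : (x :: xs).take s = x :: xs := List.take_of_length_le hle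
    have h2 : (x :: xs).drop s = [] := List.drop_eq_nil_of_le hle
    rw [h1, h2, pvChunks_nil]

-- A's loop body applied to an already-parsed row
def pvStepA (size : Int) (st : List (List Int) × List (List (List Int))) (r : List Int) :
    List (List Int) × List (List (List Int)) :=
  if PySem.List.len st.1 < size then (st.1 ++ [r], st.2) else ([r], st.2 ++ [st.1])

theorem pvStepA_fill (s : Nat) (hs : 0 < s) (rs : List (List Int)) :
    ∀ (t : List (List Int)) (m : List (List (List Int))), t.length + rs.length ≤ s →
      rs.foldl (pvStepA (s : Int)) (t, m) = (t ++ rs, m) := by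
  induction rs with
  | nil => intro t m _; simp
  | cons r rs ih =>
    intro t m h
    have h' : t.length + rs.length + 1 ≤ s := by simpa [Nat.add_comm, Nat.add_left_comm] using h
    have hlt : PySem.List.len t < (s : Int) := by
      simp [PySem.List.len_eq]; omega
    simp only [List.foldl_cons, pvStepA, hlt, if_pos]
    rw [ih (t ++ [r]) m (by simp; omega)]
    simp

theorem pvStepA_run (s : Nat) (hs : 0 < s) :
    ∀ (n : Nat) (rs : List (List Int)) (m : List (List (List Int))), rs.length = n → rs ≠ [] →
      (rs.foldl (pvStepA (s : Int)) ([], m)).2 ++ [(rs.foldl (pvStepA (s : Int)) ([], m)).1]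
        = m ++ pvChunks s rs := by
  intro n
  induction n using Nat.strong_induction_on with
  | _ n ih =>
    intro rs m hlen hne
    by_cases hle : rs.length ≤ s
    · rw [pvStepA_fill s hs rs [] m (by simpa using hle)]
      simp [pvChunks_small s hs rs hne hle]
    · -- rs longer than s: the first s rows fill temp, then the next row forces a flush
      rw [Nat.not_le] at hle
      obtain ⟨x, xs, rfl⟩ : ∃ x xs, rs = x :: xs := by
        cases rs with
        | nil => exact absurd rfl hne
        | cons x xs => exact ⟨x, xs, rfl⟩
      have hle' : s < xs.length + 1 := by simpa using hle
      have hsplit : x :: xs = (x :: xs).take s ++ (x :: xs).drop s := (List.take_append_drop _ _).symm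
      obtain ⟨d, ds, hd⟩ : ∃ d ds, (x :: xs).drop s = d :: ds := by
        cases hcon : (x :: xs).drop s with
        | nil =>
          exfalso
          have := congrArg List.length hcon
          simp at this
          omega
        | cons d ds => exact ⟨d, ds, rfl⟩
      have htl : ((x :: xs).take s).length = s := by
        rw [List.length_take]; omega
      conv_lhs => rw [hsplit]
      rw [List.foldl_append, pvStepA_fill s hs _ [] m (by rw [List.length_nil, htl]; omega), hd]
      simp only [List.nil_append]
      have hfull : ¬ PySem.List.len ((x :: xs).take s) < (s : Int) := by
        simp [PySem.List.len_eq, htl]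
      have h1 : pvStepA (s : Int) ((x :: xs).take s, m) d = ([d], m ++ [(x :: xs).take s]) := by
        simp only [pvStepA]
        rw [if_neg hfull]
      rw [List.foldl_cons, h1]
      have hrec := ih ((x :: xs).drop s).length
        (by rw [List.length_drop]; omega) ((x :: xs).drop s) (m ++ [(x :: xs).take s]) rfl
        (by rw [hd]; exact List.cons_ne_nil d ds)
      rw [hd] at hrec
      have h0 : pvStepA (s : Int) (([] : List (List Int)), m ++ [(x :: xs).take s]) d
          = ([d], m ++ [(x :: xs).take s]) := by
        simp only [pvStepA]
        rw [if_pos (by simp [PySem.List.len_eq]; omega)]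
        simp
      rw [List.foldl_cons, h0] at hrec
      rw [hrec, pvChunks_cons s hs x xs, hd]
      simp

-- B's index-stepped slicing equals pvChunks: first the pure Nat form …
theorem pvSliceChunks_nat {α : Type} (s : Nat) (hs : 0 < s) :
    ∀ (n : Nat) (rows : List α), rows.length = n →
      (List.range ((rows.length + s - 1) / s)).map (fun k => (rows.drop (s * k)).take s)
        = pvChunks s rows := by
  intro n
  induction n using Nat.strong_induction_on with
  | _ n ih =>
    intro rows hlen
    cases rows with
    | nil =>
      have h0 : ((List.nil (α := α)).length + s - 1) / s = 0 := Nat.div_eq_of_lt (by simp; omega)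
      rw [h0, pvChunks_nil]
      simp
    | cons x xs =>
      have hm : ((x :: xs).length + s - 1) / s = xs.length / s + 1 := by
        simp only [List.length_cons]
        have h1 : xs.length + 1 + s - 1 = xs.length + s := by omega
        rw [h1, Nat.add_div_right _ hs]
      have hm2 : (((x :: xs).drop s).length + s - 1) / s = xs.length / s := by
        rw [List.length_drop]
        simp only [List.length_cons]
        by_cases hc : s ≤ xs.length + 1
        · have h1 : xs.length + 1 - s + s - 1 = xs.length := by omega
          rw [h1]
        · have h1 : xs.length + 1 - s = 0 := by omega
          rw [h1, Nat.div_eq_of_lt (by omega), Nat.div_eq_of_lt (by omega)]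
      rw [hm, List.range_succ_eq_map, List.map_cons, List.map_map, pvChunks_cons s hs]
      simp only [Nat.mul_zero, List.drop_zero]
      congr 1
      have hIH := ih ((x :: xs).drop s).length
        (by simp only [List.length_drop, List.length_cons] at hlen ⊢; omega) ((x :: xs).drop s) rfl
      rw [hm2] at hIH
      rw [← hIH]
      apply List.map_congr_left
      intro k _
      simp only [Function.comp_apply]
      rw [List.drop_drop, Nat.mul_succ, Nat.add_comm s (s * k)]

-- … then the Int/pyRange form that B computes
theorem pvAlt_eq_chunks (s : Nat) (hs : 0 < s) (rows : List (List Int)) :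
    (PySem.List.pyRange 0 (PySem.List.len rows) (s : Int)).map
      (fun i => PySem.List.slice rows (some i) (some (i + (s : Int)))) = pvChunks s rows := by
  rw [PySem.List.pyRange_of_pos _ _ (by exact_mod_cast hs)]
  have hifn : (if (0 : Int) < PySem.List.len rows
      then ((PySem.List.len rows - 0 + (s : Int) - 1) / (s : Int)).toNat else 0)
      = (rows.length + s - 1) / s := by
    by_cases hc : 0 < rows.length
    · rw [if_pos (by simp [PySem.List.len_eq]; exact_mod_cast hc)]
      have h1 : (PySem.List.len rows - 0 + (s : Int) - 1) = ((rows.length + s - 1 : Nat) : Int) := by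
        simp [PySem.List.len_eq]; omega
      rw [h1]
      norm_cast
    · have h0 : rows.length = 0 := by omega
      rw [if_neg (by simp [PySem.List.len_eq, h0])]
      rw [h0, Nat.div_eq_of_lt (by omega)]
  rw [hifn, List.map_map, ← pvSliceChunks_nat s hs rows.length rows rfl]
  apply List.map_congr_left
  intro k _
  simp only [Function.comp_apply]
  have h1 : (0 : Int) + (s : Int) * (k : Int) = ((s * k : Nat) : Int) := by push_cast; ring
  rw [h1, PySem.List.slice_natCast_add]

-- ===== VERDICT (by name: the statement is the Claim_ definition above) =====
theorem make_matrices_spec : Claim_unchanged_make_matrices := by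
  intro lst size _hdom hpre hnd
  unfold Pre_make_matrices at hpre
  rw [Bool.and_eq_true] at hpre
  have hsz : 1 ≤ size := of_decide_eq_true hpre.1
  obtain ⟨s, rfl⟩ : ∃ s : Nat, size = (s : Int) := ⟨size.toNat, by omega⟩
  have hs : 0 < s := by exact_mod_cast hsz
  have hne : lst ≠ [] := by
    intro h; exact hnd (by simpa [D_make_matrices] using h)
  show make_matrices lst (s : Int) = make_matrices_alt lst (s : Int)
  unfold make_matrices make_matrices_alt
  have hfold : lst.foldl
      (fun (st : List (List Int) × List (List (List Int))) (i : String) =>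
        let to_int := (PySem.Str.split₀ (PySem.Str.stripChars i " ")).map
          (fun t => (PySem.Int.ofStr? t).getD 0)
        if PySem.List.len st.1 < (s : Int) then (st.1 ++ [to_int], st.2)
        else ([to_int], st.2 ++ [st.1]))
      ([], [])
      = (lst.map pvRow).foldl (pvStepA (s : Int)) ([], []) := by
    rw [List.foldl_map]
    rfl
  simp only [hfold]
  have hmne : lst.map pvRow ≠ [] := by simpa using hne
  have hrun := pvStepA_run s hs (lst.map pvRow).length (lst.map pvRow) [] rfl hmne
  simp only [List.nil_append] at hrun
  rw [hrun, pvAlt_eq_chunks s hs]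

theorem make_matrices_changed : Claim_changed_make_matrices := by
  unfold Claim_changed_make_matrices; decide

theorem make_matrices_tight : Claim_exact_make_matrices := by
  intro lst size _hdom hpre hd
  unfold Pre_make_matrices at hpre
  rw [Bool.and_eq_true] at hpre
  have hsz : 1 ≤ size := of_decide_eq_true hpre.1
  subst hd
  obtain ⟨s, rfl⟩ : ∃ s : Nat, size = (s : Int) := ⟨size.toNat, by omega⟩
  have hs : 0 < s := by exact_mod_cast hsz
  have hA : make_matrices [] (s : Int) = [[]] := rfl
  have hB : make_matrices_alt [] (s : Int) = [] := by
    simp only [make_matrices_alt, List.map_nil, PySem.List.len_eq, List.length_nil,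
      Nat.cast_zero]
    rw [PySem.List.pyRange_of_pos 0 0 (show (0 : Int) < (s : Int) by exact_mod_cast hs)]
    simp
  rw [hA, hB]
  simp
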